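-- pv_equiv track=rewrite | github.com/Parvaneh-S/AI-Project---Abalone-Game | src/game/layouts.py | valid_abalone_cells
-- ===== SOURCE A (Python) =====
-- from typing import Dict, Tuple, Literal
--
-- Coord = Tuple[int, int]
--
-- def valid_abalone_cells(radius: int = 4) -> list[Coord]:
--     # axial hex of radius 4 => 61 cells (real Abalone board size)
--     cells: list[Coord] = []
--     for q in range(-radius, radius + 1):
--         for r in range(-radius, radius + 1):
--             s = -q - r
--             if max(abs(q), abs(r), abs(s)) <= radius:
--                 cells.append((q, r))
--     return cells
-- ===== SOURCE B (Python) =====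
-- from typing import Tuple
--
-- Coord = Tuple[int, int]
--
-- def valid_abalone_cells(radius: int = 4) -> list[Coord]:
--     # comprehension over the exact feasible r-interval for each column q
--     return [(q, r)
--             for q in range(-radius, radius + 1)
--             for r in range(max(-radius, -q - radius), min(radius, -q + radius) + 1)]
-- ===== Notes on version B (the rewrite author's own statement) =====
-- stated objective: idiomatic
-- what changed: Replaced the full (2r+1)x(2r+1) grid scan with a per-cell max-abs filter by a single comprehension whose inner range is the exact feasible r-interval derived from the cube constraint, so the inner membership test disappears.
import Mathlib
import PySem

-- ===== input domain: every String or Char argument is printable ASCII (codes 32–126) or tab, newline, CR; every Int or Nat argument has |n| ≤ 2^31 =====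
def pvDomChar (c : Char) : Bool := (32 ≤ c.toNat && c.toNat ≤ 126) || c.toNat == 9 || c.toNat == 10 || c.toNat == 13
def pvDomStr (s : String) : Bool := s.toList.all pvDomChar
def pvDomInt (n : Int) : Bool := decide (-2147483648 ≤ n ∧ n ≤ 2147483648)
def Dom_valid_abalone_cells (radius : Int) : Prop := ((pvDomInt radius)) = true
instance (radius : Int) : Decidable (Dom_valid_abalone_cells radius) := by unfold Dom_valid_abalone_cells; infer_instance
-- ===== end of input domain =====

-- B replaces A's full-grid scan with an inner branch by a comprehension over the exact
-- feasible r-interval per column q (idiomatic; same output, the inner test disappears).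


-- ===== PORT A =====
def valid_abalone_cells (radius : Int) : List (Int × Int) :=
  (PySem.List.pyRange (-radius) (radius + 1) 1).foldl (fun cells q =>
    (PySem.List.pyRange (-radius) (radius + 1) 1).foldl (fun cells r =>
      let s := -q - r
      if max (max |q| |r|) |s| ≤ radius then cells ++ [(q, r)] else cells) cells) []

-- ===== PORT B =====
def valid_abalone_cells_alt (radius : Int) : List (Int × Int) :=
  (PySem.List.pyRange (-radius) (radius + 1) 1).flatMap (fun q =>
    (PySem.List.pyRange (max (-radius) (-q - radius)) (min radius (-q + radius) + 1) 1).map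
      (fun r => (q, r)))

-- ===== PRECONDITION & SPEC =====
def Spec_valid_abalone_cells (radius : Int) (out : List (Int × Int)) : Prop := out = valid_abalone_cells_alt radius
instance (radius : Int) (out : List (Int × Int)) : Decidable (Spec_valid_abalone_cells radius out) := by unfold Spec_valid_abalone_cells; infer_instance

-- ===== CLAIM (what is proved, stated in full; the proofs are below) =====
def Claim_equal_valid_abalone_cells : Prop := ∀ (radius : Int), Dom_valid_abalone_cells radius → Spec_valid_abalone_cells radius (valid_abalone_cells radius)

-- ===== LEMMAS AND PROOFS =====

-- once the range start has reached lo, the interval filter keeps exactly [a, hi+1)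
lemma filter_interval_from (lo hi b : Int) : ∀ (n : Nat) (a : Int), (b - a).toNat = n → lo ≤ a → hi < b →
    (PySem.List.pyRange a b 1).filter (fun x => decide (lo ≤ x ∧ x ≤ hi))
      = PySem.List.pyRange a (hi + 1) 1 := by
  intro n
  induction n with
  | zero =>
    intro a hn _ hb
    rw [PySem.List.pyRange_one_eq_nil (by omega), PySem.List.pyRange_one_eq_nil (by omega)]
    rfl
  | succ n ih =>
    intro a hn hlo hb
    rw [PySem.List.pyRange_one_cons (by omega)]
    by_cases hhi : a ≤ hi
    · rw [List.filter_cons_of_pos (by simp; omega), ih (a + 1) (by omega) (by omega) hb,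
        ← PySem.List.pyRange_one_cons (show a < hi + 1 by omega)]
    · rw [List.filter_cons_of_neg (by simp; omega), ih (a + 1) (by omega) (by omega) hb,
        PySem.List.pyRange_one_eq_nil (by omega), PySem.List.pyRange_one_eq_nil (by omega)]

-- filtering a consecutive range by membership in [lo, hi] yields the sub-range [lo, hi+1)
lemma filter_interval_pyRange (lo hi : Int) : ∀ (n : Nat) (a b : Int), (b - a).toNat = n → a ≤ lo → hi < b →
    (PySem.List.pyRange a b 1).filter (fun x => decide (lo ≤ x ∧ x ≤ hi))
      = PySem.List.pyRange lo (hi + 1) 1 := by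
  intro n
  induction n with
  | zero =>
    intro a b hn ha hb
    rw [PySem.List.pyRange_one_eq_nil (by omega), PySem.List.pyRange_one_eq_nil (by omega)]
    rfl
  | succ n ih =>
    intro a b hn ha hb
    by_cases hal : a = lo
    · subst hal; exact filter_interval_from a hi b (n + 1) a hn le_rfl hb
    · rw [PySem.List.pyRange_one_cons (by omega), List.filter_cons_of_neg (by simp; omega),
        ih (a + 1) b (by omega) (by omega) hb]

-- ===== VERDICT (by name: the statement is the Claim_ definition above) =====
theorem valid_abalone_cells_spec : Claim_equal_valid_abalone_cells := by
  intro radius _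
  unfold Spec_valid_abalone_cells valid_abalone_cells valid_abalone_cells_alt
  -- A's inner loop is an append-if fold: turn it into filter-then-map
  have hfun : (fun (cells : List (Int × Int)) q =>
      (PySem.List.pyRange (-radius) (radius + 1) 1).foldl (fun cells r =>
        let s := -q - r
        if max (max |q| |r|) |s| ≤ radius then cells ++ [(q, r)] else cells) cells)
      = fun cells q => cells ++
        ((PySem.List.pyRange (-radius) (radius + 1) 1).filter
          (fun r => decide (max (max |q| |r|) |(-q - r)| ≤ radius))).map (Prod.mk q) := by
    funext cells q
    exact PySem.List.foldl_append_ite (fun x => max (max |q| |x|) |(-q - x)| ≤ radius)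
      (Prod.mk q) (PySem.List.pyRange (-radius) (radius + 1)) cells
  rw [hfun, PySem.List.foldl_append_eq_flatMap, List.nil_append]
  refine List.flatMap_congr fun q hq => ?_
  rw [PySem.List.mem_pyRange_one] at hq
  rw [List.filter_congr (q := fun r =>
        decide (max (-radius) (-q - radius) ≤ r ∧ r ≤ min radius (-q + radius)))
      (fun r hr => by
        rw [PySem.List.mem_pyRange_one] at hr
        simp only [decide_eq_decide, max_le_iff, le_min_iff, abs_le]
        omega),
    filter_interval_pyRange _ _ (radius + 1 - -radius).toNat (-radius) (radius + 1) rfl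
      (le_max_left _ _) (by have := min_le_left radius (-q + radius); omega)]
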